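-- pv_equiv track=rewrite | github.com/YueXiao1995/algorithm | LeetCode-Python/1578 Minimum Deletion Cost to Avoid Repeating Letters.py | minCost3
-- ===== SOURCE A (Python) =====
-- def minCost3(s, cost):
--     s = str(s)
--     min_total_cost = 0
--     cost_sum = cost[0]
--     max_cost = cost[0]
--     for i in range(1, len(s)):
--         if s[i] == s[i - 1]:
--             cost_sum += cost[i]
--             if cost[i] > max_cost:
--                 max_cost = cost[i]
--         else:
--             min_total_cost += cost_sum - max_cost
--             cost_sum = cost[i]
--             max_cost = cost[i]
--     min_total_cost += cost_sum - max_cost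
--     return min_total_cost
-- ===== SOURCE B (Python) =====
-- def minCost3(s, cost):
--     # Two staged passes: first materialise the maximal-run lengths of s,
--     # then for each run take the corresponding cost slice and pay sum - max.
--     s = str(s)
--     n = len(s)
--     runs = []
--     j = 0
--     while j < n:
--         k = j
--         while k < n and s[k] == s[j]:
--             k += 1
--         runs.append(k - j)
--         j = k
--     total = 0
--     i = 0
--     for L in runs:
--         seg = cost[i:i + L]
--         total += sum(seg) - max(seg)
--         i += L
--     return total
-- ===== Notes on version B (the rewrite author's own statement) =====
-- stated objective: alternative
-- what changed: B replaces A's single online pass with rolling run-sum/run-max state by a staged group-then-reduce structure: a first pass materialises the maximal run lengths of s, then a second pass slices cost per run and pays sum(slice) - max(slice) via the builtins; no rolling accumulator state crosses run boundaries.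
import Mathlib
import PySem

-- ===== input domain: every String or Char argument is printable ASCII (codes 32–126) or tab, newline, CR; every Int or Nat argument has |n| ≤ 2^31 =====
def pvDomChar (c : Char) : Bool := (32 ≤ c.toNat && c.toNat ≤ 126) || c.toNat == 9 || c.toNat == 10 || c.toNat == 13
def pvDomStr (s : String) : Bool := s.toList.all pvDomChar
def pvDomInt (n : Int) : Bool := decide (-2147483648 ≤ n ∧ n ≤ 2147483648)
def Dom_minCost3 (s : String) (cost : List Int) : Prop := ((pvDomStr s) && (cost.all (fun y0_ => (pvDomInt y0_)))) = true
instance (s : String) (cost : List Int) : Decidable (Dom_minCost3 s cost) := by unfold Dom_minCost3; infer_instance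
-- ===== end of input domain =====

-- B replaces A's single online pass (rolling run-sum/run-max, flushed at run ends and after
-- the loop) by a staged group-then-reduce: materialise the run lengths, then per run pay
-- sum(slice) - max(slice) over the cost slice. Objective: alternative (same cost).

-- ===== PORT A =====
-- loop body of A's for-loop, state (min_total_cost, cost_sum, max_cost)
def minCost3Step (sl : List Char) (cost : List Int) (st : Int × Int × Int) (i : Int) :
    Int × Int × Int :=
  if PySem.List.pyGetD sl i ' ' == PySem.List.pyGetD sl (i - 1) ' ' then
    let c := PySem.List.pyGetD cost i 0
    (st.1, st.2.1 + c, if c > st.2.2 then c else st.2.2)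
  else
    let c := PySem.List.pyGetD cost i 0
    (st.1 + st.2.1 - st.2.2, c, c)

def minCost3 (s : String) (cost : List Int) : Int :=
  let sl := s.toList
  let c0 := PySem.List.pyGetD cost 0 0
  let r := (PySem.List.pyRange 1 (sl.length : Int) 1).foldl (minCost3Step sl cost) (0, c0, c0)
  r.1 + r.2.1 - r.2.2

-- ===== PORT B =====
-- inner while loop of B: advance k while k < n and s[k] == s[j]
def runEnd (sl : List Char) (j k : Nat) : Nat :=
  if k < sl.length ∧ sl.getD k ' ' == sl.getD j ' ' then runEnd sl j (k + 1) else k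
termination_by sl.length - k
decreasing_by omega

-- runEnd never moves left (cited by runsFrom's termination proof)
theorem le_runEnd (sl : List Char) (j k : Nat) : k ≤ runEnd sl j k := by
  rw [runEnd]
  split
  · have := le_runEnd sl j (k + 1); omega
  · exact le_refl k
termination_by sl.length - k
decreasing_by omega

-- outer while loop of B: the list of maximal run lengths from position j
def runsFrom (sl : List Char) (j : Nat) : List Nat :=
  if h : j < sl.length then
    (runEnd sl j j - j) :: runsFrom sl (runEnd sl j j)
  else []
termination_by sl.length - j
decreasing_by
  have h1 : j + 1 ≤ runEnd sl j (j + 1) := le_runEnd sl j (j + 1)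
  have h2 : runEnd sl j j = runEnd sl j (j + 1) := by
    conv_lhs => rw [runEnd]
    simp [h]
  omega

-- body of B's for-loop over the run lengths, state (total, i)
def minCost3AltStep (cost : List Int) (st : Int × Nat) (L : Nat) : Int × Nat :=
  let seg := PySem.List.slice cost (some (st.2 : Int)) (some ((st.2 + L : Nat) : Int))
  (st.1 + seg.sum - (PySem.List.max? seg (fun y => y)).getD 0, st.2 + L)

def minCost3_alt (s : String) (cost : List Int) : Int :=
  ((runsFrom s.toList 0).foldl (minCost3AltStep cost) (0, 0)).1

-- ===== PRECONDITION & SPEC =====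
-- Pre_ excludes exactly the inputs where A raises IndexError: empty cost (eager cost[0])
-- and cost shorter than s (cost[i] is indexed for every position of s).
def Pre_minCost3 (s : String) (cost : List Int) : Prop :=
  cost ≠ [] ∧ s.length ≤ cost.length
instance (s : String) (cost : List Int) : Decidable (Pre_minCost3 s cost) := by
  unfold Pre_minCost3; infer_instance
def pvWitness_minCost3 : String × List Int := ("abba", [1, 2, 3, 4])

def Spec_minCost3 (s : String) (cost : List Int) (out : Int) : Prop := out = minCost3_alt s cost
instance (s : String) (cost : List Int) (out : Int) : Decidable (Spec_minCost3 s cost out) := by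
  unfold Spec_minCost3; infer_instance

-- ===== CLAIM (what is proved, stated in full; the proofs are below) =====
def Claim_equal_minCost3 : Prop := ∀ (s : String) (cost : List Int), Dom_minCost3 s cost → Pre_minCost3 s cost → Spec_minCost3 s cost (minCost3 s cost)

-- ===== LEMMAS AND PROOFS =====

-- glue: pyGetD at a Nat index is List.getD
theorem pyGetD_nat_char (l : List Char) (i : Nat) (d : Char) :
    PySem.List.pyGetD l (i : Int) d = l.getD i d := by
  simp [PySem.List.pyGetD_natCast, List.getD_eq_getElem?_getD]

theorem pyGetD_nat_int (l : List Int) (i : Nat) (d : Int) :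
    PySem.List.pyGetD l (i : Int) d = l.getD i d := by
  simp [PySem.List.pyGetD_natCast, List.getD_eq_getElem?_getD]

theorem runEnd_le (sl : List Char) (j k : Nat) (hk : k ≤ sl.length) :
    runEnd sl j k ≤ sl.length := by
  rw [runEnd]
  split
  · next h => exact runEnd_le sl j (k + 1) (by omega)
  · exact hk
termination_by sl.length - k
decreasing_by omega

theorem runEnd_chars (sl : List Char) (j k : Nat) :
    ∀ i, k ≤ i → i < runEnd sl j k → sl.getD i ' ' = sl.getD j ' ' := by
  intro i hki hi
  rw [runEnd] at hi
  split at hi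
  · next h =>
    by_cases hik : i = k
    · subst hik; exact eq_of_beq h.2
    · exact runEnd_chars sl j (k + 1) i (by omega) hi
  · omega
termination_by sl.length - k
decreasing_by omega

theorem runEnd_stop (sl : List Char) (j k : Nat) :
    ¬ (runEnd sl j k < sl.length ∧ sl.getD (runEnd sl j k) ' ' == sl.getD j ' ') := by
  rw [runEnd]
  split
  · exact runEnd_stop sl j (k + 1)
  · next h => exact h
termination_by sl.length - k
decreasing_by omega

theorem lt_runEnd_self (sl : List Char) (j : Nat) (hj : j < sl.length) :
    j < runEnd sl j j := by
  have h1 : j + 1 ≤ runEnd sl j (j + 1) := le_runEnd sl j (j + 1)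
  have h2 : runEnd sl j j = runEnd sl j (j + 1) := by
    conv_lhs => rw [runEnd]
    simp [hj]
  omega

-- A's fold over one run's interior: the state accumulates the slice's sum and running max
theorem innerRun (sl : List Char) (cost : List Int) (b : Nat) (hb : b ≤ cost.length)
    (a : Nat) (ha1 : 1 ≤ a) (hab : a ≤ b)
    (hrun : ∀ i : Nat, a ≤ i → i < b → sl.getD i ' ' = sl.getD (i - 1) ' ') :
    ∀ t S M : Int,
    (PySem.List.pyRange (a : Int) (b : Int) 1).foldl (minCost3Step sl cost) (t, S, M) =
      (t, S + ((cost.drop a).take (b - a)).sum, ((cost.drop a).take (b - a)).foldl max M) := by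
  intro t S M
  by_cases hlt : a < b
  · have halen : a < cost.length := by omega
    have hcons := PySem.List.pyRange_one_cons (a := (a : Int)) (b := (b : Int))
      (by exact_mod_cast hlt)
    rw [hcons, List.foldl_cons]
    have ha1' : ((a : Int) + 1) = ((a + 1 : Nat) : Int) := by push_cast; ring
    have hstep : minCost3Step sl cost (t, S, M) (a : Int) =
        (t, S + cost.getD a 0, max M (cost.getD a 0)) := by
      unfold minCost3Step
      have hch : sl.getD a ' ' = sl.getD (a - 1) ' ' := hrun a le_rfl hlt
      have hcond : PySem.List.pyGetD sl (a : Int) ' ' == PySem.List.pyGetD sl ((a : Int) - 1) ' ' := by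
        have hc1 : ((a : Int) - 1) = ((a - 1 : Nat) : Int) := by omega
        rw [hc1, pyGetD_nat_char, pyGetD_nat_char]
        exact beq_iff_eq.mpr hch
      simp only [hcond, if_true, pyGetD_nat_int]
      have : (if cost.getD a 0 > M then cost.getD a 0 else M) = max M (cost.getD a 0) := by
        split <;> omega
      rw [this]
    rw [hstep, ha1']
    rw [innerRun sl cost b hb (a + 1) (by omega) (by omega)
      (fun i h1 h2 => hrun i (by omega) h2) t (S + cost.getD a 0) (max M (cost.getD a 0))]
    have htake : (cost.drop a).take (b - a) = cost[a] :: (cost.drop (a + 1)).take (b - (a + 1)) := by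
      rw [List.drop_eq_getElem_cons halen]
      have : b - a = (b - (a + 1)) + 1 := by omega
      rw [this, List.take_succ_cons]
    have hgetD : cost.getD a 0 = cost[a] := List.getD_eq_getElem cost 0 halen
    rw [htake, hgetD, List.sum_cons, List.foldl_cons, add_assoc]
  · have hab' : a = b := by omega
    subst hab'
    simp [PySem.List.pyRange_one_eq_nil le_rfl]
termination_by b - a
decreasing_by omega

-- main induction: from any run start j, A's flushed fold equals B's stage-2 fold
theorem mainRun (sl : List Char) (cost : List Int) (hlen : sl.length ≤ cost.length)
    (j : Nat) (hj : j < sl.length) : ∀ t : Int,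
    (((PySem.List.pyRange ((j + 1 : Nat) : Int) (sl.length : Int) 1).foldl
        (minCost3Step sl cost) (t, cost.getD j 0, cost.getD j 0)).1 +
     ((PySem.List.pyRange ((j + 1 : Nat) : Int) (sl.length : Int) 1).foldl
        (minCost3Step sl cost) (t, cost.getD j 0, cost.getD j 0)).2.1 -
     ((PySem.List.pyRange ((j + 1 : Nat) : Int) (sl.length : Int) 1).foldl
        (minCost3Step sl cost) (t, cost.getD j 0, cost.getD j 0)).2.2) =
    ((runsFrom sl j).foldl (minCost3AltStep cost) (t, j)).1 := by
  intro t
  have hje : j < runEnd sl j j := lt_runEnd_self sl j hj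
  set e := runEnd sl j j with he
  have hen : e ≤ sl.length := runEnd_le sl j j (by omega)
  have hrunch : ∀ i : Nat, j ≤ i → i < e → sl.getD i ' ' = sl.getD j ' ' :=
    fun i h1 h2 => runEnd_chars sl j j i h1 h2
  have hrunadj : ∀ i : Nat, j + 1 ≤ i → i < e → sl.getD i ' ' = sl.getD (i - 1) ' ' := by
    intro i h1 h2
    rw [hrunch i (by omega) h2]
    by_cases hij : i - 1 = j
    · rw [hij]
    · rw [hrunch (i - 1) (by omega) (by omega)]
  have hruns : runsFrom sl j = (e - j) :: runsFrom sl e := by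
    conv_lhs => rw [runsFrom]
    simp [hj, ← he]
  have hjc : j < cost.length := by omega
  have hgetD : cost.getD j 0 = cost[j] := List.getD_eq_getElem cost 0 hjc
  have hseg : PySem.List.slice cost (some (j : Int)) (some ((j + (e - j) : Nat) : Int)) =
      (cost.drop j).take (e - j) := by
    rw [PySem.List.slice_natCast]
    congr 1
    omega
  have hsegcons : (cost.drop j).take (e - j) = cost[j] :: (cost.drop (j + 1)).take (e - (j + 1)) := by
    rw [List.drop_eq_getElem_cons hjc]
    have : e - j = (e - (j + 1)) + 1 := by omega
    rw [this, List.take_succ_cons]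
  have hmax : (PySem.List.max? ((cost.drop j).take (e - j)) (fun y => y)).getD 0 =
      ((cost.drop (j + 1)).take (e - (j + 1))).foldl max cost[j] := by
    rw [hsegcons, PySem.List.max?_id_cons]
    rfl
  have hsum : ((cost.drop j).take (e - j)).sum =
      cost[j] + ((cost.drop (j + 1)).take (e - (j + 1))).sum := by
    rw [hsegcons, List.sum_cons]
  have hinner := innerRun sl cost e (le_trans hen hlen) (j + 1) (by omega) (by omega) hrunadj t
    (cost.getD j 0) (cost.getD j 0)
  by_cases hend : e < sl.length
  · -- run ends at an unequal character: A flushes at index e, both sides continue from e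
    have hsplit : PySem.List.pyRange ((j + 1 : Nat) : Int) (sl.length : Int) 1 =
        PySem.List.pyRange ((j + 1 : Nat) : Int) ((e : Nat) : Int) 1 ++
        PySem.List.pyRange ((e : Nat) : Int) (sl.length : Int) 1 :=
      PySem.List.pyRange_one_append _ _ _ (by exact_mod_cast hje) (by exact_mod_cast hen)
    have hcons : PySem.List.pyRange ((e : Nat) : Int) (sl.length : Int) 1 =
        (e : Int) :: PySem.List.pyRange ((e : Int) + 1) (sl.length : Int) 1 :=
      PySem.List.pyRange_one_cons (by exact_mod_cast hend)
    have hboundary : ¬ (PySem.List.pyGetD sl (e : Int) ' ' == PySem.List.pyGetD sl ((e : Int) - 1) ' ') = true := by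
      have hstop := runEnd_stop sl j j
      rw [← he] at hstop
      have hne : ¬ (sl.getD e ' ' == sl.getD j ' ') = true := fun hcontra => hstop ⟨hend, hcontra⟩
      have hprev : sl.getD (e - 1) ' ' = sl.getD j ' ' := hrunch (e - 1) (by omega) (by omega)
      have hc1 : ((e : Int) - 1) = ((e - 1 : Nat) : Int) := by omega
      rw [hc1, pyGetD_nat_char, pyGetD_nat_char, hprev]
      exact hne
    have hstep : minCost3Step sl cost
        (t, cost.getD j 0 + ((cost.drop (j + 1)).take (e - (j + 1))).sum,
          ((cost.drop (j + 1)).take (e - (j + 1))).foldl max (cost.getD j 0)) (e : Int) =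
        (t + (cost.getD j 0 + ((cost.drop (j + 1)).take (e - (j + 1))).sum) -
           ((cost.drop (j + 1)).take (e - (j + 1))).foldl max (cost.getD j 0),
         cost.getD e 0, cost.getD e 0) := by
      unfold minCost3Step
      simp only [hboundary, if_false, Bool.false_eq_true, pyGetD_nat_int]
    have he1 : ((e : Int) + 1) = ((e + 1 : Nat) : Int) := by push_cast; ring
    rw [hsplit, List.foldl_append, hinner, hcons, List.foldl_cons, hstep, he1]
    have hIH := mainRun sl cost hlen e hend
      (t + (cost.getD j 0 + ((cost.drop (j + 1)).take (e - (j + 1))).sum) -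
        ((cost.drop (j + 1)).take (e - (j + 1))).foldl max (cost.getD j 0))
    rw [hIH, hruns, List.foldl_cons]
    have hstepB : minCost3AltStep cost (t, j) (e - j) =
        (t + ((cost.drop j).take (e - j)).sum -
          (PySem.List.max? ((cost.drop j).take (e - j)) (fun y => y)).getD 0, e) := by
      unfold minCost3AltStep
      rw [hseg]
      have h2 : j + (e - j) = e := by omega
      rw [h2]
    rw [hstepB, hmax, hsum, hgetD]
  · -- the run reaches the end of s: A's post-loop flush equals B's last run payment
    have hee : e = sl.length := by omega
    have hnil : runsFrom sl e = [] := by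
      rw [runsFrom]; simp [hee]
    rw [← hee]
    rw [hinner, hruns, List.foldl_cons, hnil, List.foldl_nil]
    have hstepB : minCost3AltStep cost (t, j) (e - j) =
        (t + ((cost.drop j).take (e - j)).sum -
          (PySem.List.max? ((cost.drop j).take (e - j)) (fun y => y)).getD 0, e) := by
      unfold minCost3AltStep
      rw [hseg]
      have h2 : j + (e - j) = e := by omega
      rw [h2]
    rw [hstepB, hmax, hsum, hgetD]
termination_by sl.length - j
decreasing_by omega

theorem minCost3_eq (s : String) (cost : List Int) (hpre : Pre_minCost3 s cost) :
    minCost3 s cost = minCost3_alt s cost := by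
  obtain ⟨hne, hlen⟩ := hpre
  simp only [minCost3, minCost3_alt]
  have hlen' : s.toList.length ≤ cost.length := by
    have : s.toList.length = s.length := by simp
    omega
  by_cases h0 : s.toList.length = 0
  · rw [runsFrom]
    simp [h0, PySem.List.pyRange_one_eq_nil]
  · have hj0 : 0 < s.toList.length := by omega
    have hm := mainRun s.toList cost hlen' 0 hj0 0
    have hc0 : PySem.List.pyGetD cost 0 0 = cost.getD 0 0 := by
      exact_mod_cast pyGetD_nat_int cost 0 0
    have h01 : ((0 + 1 : Nat) : Int) = (1 : Int) := by norm_num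
    rw [h01] at hm
    simp only [hc0]
    exact hm

-- ===== VERDICT (by name: the statement is the Claim_ definition above) =====
theorem minCost3_spec : Claim_equal_minCost3 := by
  intro s cost _ hpre
  unfold Spec_minCost3
  exact minCost3_eq s cost hpre
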